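-- pv_equiv track=rewrite | github.com/Beyond-Procwise/BP_Backend | src/agents/extraction_engine.py | _find_header
-- ===== SOURCE A (Python) =====
-- from typing import Any, Callable, Optional, TypedDict
--
-- _HEADER_KEYWORDS = {
--     "item": ["description", "item", "product", "service", "particular", "details"],
--     "quantity": ["qty", "quantity", "units", "no", "count"],
--     "unit_price": ["price", "rate", "unit price", "unit cost", "cost", "each"],
--     "amount": ["amount", "subtotal", "sub-total", "total", "line total", "ext", "extended"],
-- }
--
-- def _find_header(
--     text_rows: list[list[str]],
-- ) -> tuple[Optional[int], Optional[dict[str, int]]]: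
--
--     for idx, row in enumerate(text_rows):
--         col_map: dict[str, int] = {}
--         for col_idx, cell in enumerate(row):
--             cell_lower = cell.lower().strip()
--             for field, keywords in _HEADER_KEYWORDS.items():
--                 if any(kw in cell_lower for kw in keywords):
--                     if field not in col_map:
--                         col_map[field] = col_idx
--
--         if "item" in col_map and len(col_map) >= 2:
--             return idx, col_map
--
--     return None, None
-- ===== SOURCE B (Python) =====
-- _HEADER_KEYWORDS = {
--     "item": ["description", "item", "product", "service", "particular", "details"],
--     "quantity": ["qty", "quantity", "units", "no", "count"],
--     "unit_price": ["price", "rate", "unit price", "unit cost", "cost", "each"],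
--     "amount": ["amount", "subtotal", "sub-total", "total", "line total", "ext", "extended"],
-- }
--
-- def _find_header(text_rows):
--     # Worklist decomposition: keep the fields still unmatched; per column, move the
--     # fields that match this cell to `found` (preserving first-match column order)
--     # and stop scanning the row once every field has been found.
--     for idx, row in enumerate(text_rows):
--         remaining = list(_HEADER_KEYWORDS.items())
--         found = []
--         for col_idx, cell in enumerate(row):
--             if not remaining:
--                 break
--             cell_lower = cell.lower().strip()
--             still = []
--             for field, keywords in remaining:
--                 if any(kw in cell_lower for kw in keywords):
--                     found.append((field, col_idx))
--                 else:
--                     still.append((field, keywords))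
--             remaining = still
--         if len(found) >= 2 and any(f == "item" for f, _ in found):
--             return idx, dict(found)
--     return None, None
-- ===== Notes on version B (the rewrite author's own statement) =====
-- stated objective: alternative
-- what changed: Replaces A's per-cell loop over all four fields with dict-membership bookkeeping by a shrinking worklist of still-unmatched fields: each column partitions the worklist into newly found fields (appended with their column) and the rest, and the row scan stops early once every field is found.
import Mathlib
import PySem

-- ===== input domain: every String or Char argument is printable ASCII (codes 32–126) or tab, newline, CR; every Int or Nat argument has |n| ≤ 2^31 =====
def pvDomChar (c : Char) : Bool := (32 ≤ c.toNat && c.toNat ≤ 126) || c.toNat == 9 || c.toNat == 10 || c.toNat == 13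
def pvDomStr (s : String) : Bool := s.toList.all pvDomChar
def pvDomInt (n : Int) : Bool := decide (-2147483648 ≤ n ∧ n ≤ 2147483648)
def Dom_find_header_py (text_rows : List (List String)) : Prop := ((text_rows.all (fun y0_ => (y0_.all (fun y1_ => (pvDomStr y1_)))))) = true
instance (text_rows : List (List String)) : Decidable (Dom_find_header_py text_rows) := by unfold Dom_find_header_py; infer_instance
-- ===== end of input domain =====

-- B replaces A's per-cell dict-membership bookkeeping with a shrinking worklist of
-- still-unmatched fields (per column: move matched fields to `found`, stop once all
-- are found); objective: alternative decomposition, same results.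

-- shared constant: the literal _HEADER_KEYWORDS table (insertion order)
def pvKeywords : List (String × List String) :=
  [("item", ["description", "item", "product", "service", "particular", "details"]),
   ("quantity", ["qty", "quantity", "units", "no", "count"]),
   ("unit_price", ["price", "rate", "unit price", "unit cost", "cost", "each"]),
   ("amount", ["amount", "subtotal", "sub-total", "total", "line total", "ext", "extended"])]

-- shared helper: any(kw in cell_lower for kw in keywords)
def pvCellMatch (cl : String) (kws : List String) : Bool :=
  kws.any (fun kw => PySem.Str.isIn kw cl)

-- ===== PORT A =====
-- the inner two loops of A: build col_map over the enumerated cells of one row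
def find_header_row (row : List String) (start : Int) (d0 : PySem.Dict String Int) :
    PySem.Dict String Int :=
  (PySem.List.enumerate row start).foldl (fun d p =>
    let cell_lower := PySem.Str.strip (PySem.Str.lower p.2)
    pvKeywords.foldl (fun d q =>
      if pvCellMatch cell_lower q.2 then
        (if d.contains q.1 then d else d.insert q.1 p.1)
      else d) d) d0

def find_header_go : Int → List (List String) → Option Int × (Option (List (String × Int)))
  | _, [] => (none, none)
  | idx, row :: rest =>
    let col_map := find_header_row row 0 PySem.Dict.empty
    if col_map.contains "item" && decide (2 ≤ PySem.Dict.size col_map) then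
      (some idx, some col_map.items)
    else find_header_go (idx + 1) rest

def find_header_py (text_rows : List (List String)) : Option Int × (Option (List (String × Int))) :=
  find_header_go 0 text_rows

-- ===== PORT B =====
-- B's inner row scan: worklist `rem` of unmatched fields, accumulator `found`
def alt_scan : List (String × List String) → List (String × Int) → Int → List String →
    List (String × Int)
  | _, found, _, [] => found
  | rem, found, col_idx, cell :: rest =>
    if rem.isEmpty then found
    else
      let cell_lower := PySem.Str.strip (PySem.Str.lower cell)
      let fs := rem.foldl (fun (acc : List (String × Int) × List (String × List String)) q =>
        if pvCellMatch cell_lower q.2 then (acc.1 ++ [(q.1, col_idx)], acc.2)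
        else (acc.1, acc.2 ++ [q])) (found, [])
      alt_scan fs.2 fs.1 (col_idx + 1) rest

def find_header_alt_go : Int → List (List String) → Option Int × (Option (List (String × Int)))
  | _, [] => (none, none)
  | idx, row :: rest =>
    let found := alt_scan pvKeywords [] 0 row
    if decide (2 ≤ found.length) && found.any (fun p => p.1 == "item") then
      (some idx, some (PySem.Dict.ofList found).items)
    else find_header_alt_go (idx + 1) rest

def find_header_py_alt (text_rows : List (List String)) : Option Int × (Option (List (String × Int))) :=
  find_header_alt_go 0 text_rows

-- ===== PRECONDITION & SPEC =====
def Spec_find_header_py (text_rows : List (List String)) (out : Option Int × (Option (List (String × Int)))) : Prop := out = find_header_py_alt text_rows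
instance (text_rows : List (List String)) (out : Option Int × (Option (List (String × Int)))) : Decidable (Spec_find_header_py text_rows out) := by unfold Spec_find_header_py; infer_instance

-- ===== CLAIM (what is proved, stated in full; the proofs are below) =====
def Claim_equal_find_header_py : Prop := ∀ (text_rows : List (List String)), Dom_find_header_py text_rows → Spec_find_header_py text_rows (find_header_py text_rows)

-- ===== LEMMAS AND PROOFS =====

theorem stepB (cl : String) (ci : Int) (L : List (String × List String))
    (acc1 : List (String × Int)) (acc2 : List (String × List String)) :
    (L.foldl (fun (acc : List (String × Int) × List (String × List String)) q =>
      if pvCellMatch cl q.2 then (acc.1 ++ [(q.1, ci)], acc.2)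
      else (acc.1, acc.2 ++ [q])) (acc1, acc2))
    = (acc1 ++ (L.filter (fun q => pvCellMatch cl q.2)).map (fun q => (q.1, ci)),
       acc2 ++ L.filter (fun q => !pvCellMatch cl q.2)) := by
  induction L generalizing acc1 acc2 with
  | nil => simp
  | cons q L ih =>
    by_cases h : pvCellMatch cl q.2
    · simp [h, ih]
    · simp [h, ih]

theorem stepA_items (cl : String) (ci : Int) (L : List (String × List String))
    (hL : (L.map Prod.fst).Nodup) (d : PySem.Dict String Int) :
    (L.foldl (fun d q =>
      if pvCellMatch cl q.2 then (if d.contains q.1 then d else d.insert q.1 ci) else d) d).items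
    = d.items ++ (L.filter (fun q => pvCellMatch cl q.2 && !d.contains q.1)).map
        (fun q => (q.1, ci)) := by
  induction L generalizing d with
  | nil => simp
  | cons q L ih =>
    simp only [List.map_cons, List.nodup_cons] at hL
    obtain ⟨hq, hL'⟩ := hL
    by_cases h : pvCellMatch cl q.2
    · by_cases hc : d.contains q.1
      · simp [h, hc, ih hL' _]
      · have hcong : L.filter (fun r => pvCellMatch cl r.2 && !(d.insert q.1 ci).contains r.1)
            = L.filter (fun r => pvCellMatch cl r.2 && !d.contains r.1) := by
          apply List.filter_congr
          intro r hr
          have hne : (r.1 == q.1) = false := by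
            refine beq_eq_false_iff_ne.mpr ?_
            intro e; exact hq (e ▸ List.mem_map_of_mem hr)
          simp [PySem.Dict.contains_insert, hne]
        have hc' : d.contains q.1 = false := by simpa using hc
        simp only [h, hc', if_true, Bool.false_eq_true, if_false, Bool.not_false, Bool.and_true,
          List.foldl_cons, List.filter_cons]
        rw [ih hL' _, hcong]
        simp [PySem.Dict.items_insert, hc']
    · simp [h, ih hL' _]

theorem stepA_contains (cl : String) (ci : Int) (L : List (String × List String))
    (hL : (L.map Prod.fst).Nodup) (d : PySem.Dict String Int) (k : String) :
    (L.foldl (fun d q =>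
      if pvCellMatch cl q.2 then (if d.contains q.1 then d else d.insert q.1 ci) else d) d).contains k
    = (d.contains k ||
       (L.filter (fun q => pvCellMatch cl q.2 && !d.contains q.1)).any (fun q => q.1 == k)) := by
  induction L generalizing d with
  | nil => simp
  | cons q L ih =>
    simp only [List.map_cons, List.nodup_cons] at hL
    obtain ⟨hq, hL'⟩ := hL
    by_cases h : pvCellMatch cl q.2
    · by_cases hc : d.contains q.1
      · simp [h, hc, ih hL' _]
      · have hcong : L.filter (fun r => pvCellMatch cl r.2 && !(d.insert q.1 ci).contains r.1)
            = L.filter (fun r => pvCellMatch cl r.2 && !d.contains r.1) := by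
          apply List.filter_congr
          intro r hr
          have hne : (r.1 == q.1) = false := by
            refine beq_eq_false_iff_ne.mpr ?_
            intro e; exact hq (e ▸ List.mem_map_of_mem hr)
          simp [PySem.Dict.contains_insert, hne]
        have hc' : d.contains q.1 = false := by simpa using hc
        simp only [h, hc', if_true, Bool.false_eq_true, if_false, List.foldl_cons,
          List.filter_cons, Bool.not_false, Bool.and_true]
        rw [ih hL' _, hcong]
        simp only [PySem.Dict.contains_insert, List.any_cons]
        by_cases e : q.1 = k
        · simp [← e, hc']
        · have e1 : (q.1 == k) = false := by simp [e]
          have e2 : (k == q.1) = false := by simp; exact fun h => e h.symm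
          simp [e1, e2]
    · simp [h, ih hL' _]

theorem pvKeys_nodup : (pvKeywords.map Prod.fst).Nodup := by decide

theorem pvKeys_inj {q r : String × List String} (hq : q ∈ pvKeywords) (hr : r ∈ pvKeywords)
    (e : r.1 = q.1) : r = q := by
  fin_cases hq <;> fin_cases hr <;> first | rfl | (exfalso; revert e; decide)

theorem inner_noop (cl : String) (ci : Int) (L : List (String × List String))
    (d : PySem.Dict String Int) (h : ∀ q ∈ L, d.contains q.1 = true) :
    (L.foldl (fun d q =>
      if pvCellMatch cl q.2 then (if d.contains q.1 then d else d.insert q.1 ci) else d) d) = d := by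
  induction L with
  | nil => rfl
  | cons q L ih =>
    have hq := h q (List.mem_cons_self ..)
    simp only [List.foldl_cons, hq, if_true]
    have : (if pvCellMatch cl q.2 then d else d) = d := by split <;> rfl
    rw [this]
    exact ih (fun r hr => h r (List.mem_cons_of_mem _ hr))

theorem row_noop (cells : List String) (ci : Int) (d : PySem.Dict String Int)
    (h : ∀ q ∈ pvKeywords, d.contains q.1 = true) :
    find_header_row cells ci d = d := by
  induction cells generalizing ci with
  | nil => rfl
  | cons c cells ih =>
    unfold find_header_row
    rw [PySem.List.enumerate_cons, List.foldl_cons]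
    have := inner_noop (PySem.Str.strip (PySem.Str.lower c)) ci pvKeywords d h
    simp only [this]
    exact ih (ci + 1)

theorem row_eq (cells : List String) (ci : Int) (d : PySem.Dict String Int)
    (rem : List (String × List String)) (found : List (String × Int))
    (hitems : d.items = found)
    (hrem : rem = pvKeywords.filter (fun q => !d.contains q.1)) :
    alt_scan rem found ci cells = (find_header_row cells ci d).items := by
  induction cells generalizing ci d rem found with
  | nil => simpa [alt_scan, find_header_row] using hitems.symm
  | cons c cells ih =>
    by_cases hempty : rem.isEmpty
    · have hrem0 : rem = [] := List.isEmpty_iff.mp hempty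
      have hall : ∀ q ∈ pvKeywords, d.contains q.1 = true := by
        intro q hq
        by_contra hc
        have : q ∈ pvKeywords.filter (fun q => !d.contains q.1) := by
          simp [List.mem_filter, hq]; simpa using hc
        rw [← hrem, hrem0] at this
        exact absurd this (List.not_mem_nil)
      rw [row_noop _ _ _ hall, hitems]
      simp [alt_scan, hrem0]
    · set cl := PySem.Str.strip (PySem.Str.lower c) with hcl
      set d' := pvKeywords.foldl (fun d q =>
        if pvCellMatch cl q.2 then (if d.contains q.1 then d else d.insert q.1 ci) else d) d with hd'
      have hfilt : pvKeywords.filter (fun q => pvCellMatch cl q.2 && !d.contains q.1)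
          = rem.filter (fun q => pvCellMatch cl q.2) := by
        rw [hrem, List.filter_filter]
      have hitems' : d'.items = found ++ (rem.filter (fun q => pvCellMatch cl q.2)).map
          (fun q => (q.1, ci)) := by
        rw [hd', stepA_items cl ci pvKeywords pvKeys_nodup d, hitems, hfilt]
      have hrem' : rem.filter (fun q => !pvCellMatch cl q.2)
          = pvKeywords.filter (fun q => !d'.contains q.1) := by
        rw [hrem, List.filter_filter]
        apply List.filter_congr
        intro q hq
        rw [hd', stepA_contains cl ci pvKeywords pvKeys_nodup d q.1, hfilt]
        by_cases hc : d.contains q.1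
        · simp [hc]
        · have hc' : d.contains q.1 = false := by simpa using hc
          simp only [hc', Bool.not_false, Bool.and_true, Bool.false_or]
          by_cases ht : pvCellMatch cl q.2
          · have : (rem.filter (fun q => pvCellMatch cl q.2)).any (fun r => r.1 == q.1) = true := by
              refine List.any_eq_true.mpr ⟨q, ?_, by simp⟩
              rw [hrem]; simp [List.mem_filter, hq, hc', ht]
            simp [ht, this]
          · have : (rem.filter (fun q => pvCellMatch cl q.2)).any (fun r => r.1 == q.1) = false := by
              refine List.any_eq_false.mpr ?_
              rintro r hrf
              have hrrem : r ∈ rem := List.mem_of_mem_filter hrf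
              have htr : pvCellMatch cl r.2 = true := (List.mem_filter.mp hrf).2
              have hrk : r ∈ pvKeywords := by
                rw [hrem] at hrrem; exact List.mem_of_mem_filter hrrem
              intro he
              have : r = q := pvKeys_inj hq hrk (by simpa using he)
              rw [this] at htr
              exact ht htr
            simp [ht, this]
      -- unfold one step of alt_scan and of find_header_row
      have hA : find_header_row (c :: cells) ci d = find_header_row cells (ci + 1) d' := by
        unfold find_header_row
        rw [PySem.List.enumerate_cons, List.foldl_cons]
      rw [hA]
      simp only [alt_scan, hempty, Bool.false_eq_true, if_false]
      rw [stepB cl ci rem found []]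
      exact ih (ci + 1) d' _ _ hitems' hrem'


theorem inner_nodup (cl : String) (ci : Int) (L : List (String × List String))
    (d : PySem.Dict String Int) (h : d.keys.Nodup) :
    (L.foldl (fun d q =>
      if pvCellMatch cl q.2 then (if d.contains q.1 then d else d.insert q.1 ci) else d) d).keys.Nodup := by
  induction L generalizing d with
  | nil => exact h
  | cons q L ih =>
    simp only [List.foldl_cons]
    split
    · split
      · exact ih d h
      · exact ih _ (PySem.Dict.nodup_keys_insert _ _ _ h)
    · exact ih d h

theorem row_nodup (cells : List String) (ci : Int) (d : PySem.Dict String Int)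
    (h : d.keys.Nodup) : (find_header_row cells ci d).keys.Nodup := by
  induction cells generalizing ci d with
  | nil => exact h
  | cons c cells ih =>
    unfold find_header_row
    rw [PySem.List.enumerate_cons, List.foldl_cons]
    exact ih _ _ (inner_nodup _ _ _ _ h)

theorem items_ofList_of_nodup (l : List (String × Int)) (h : (l.map Prod.fst).Nodup) :
    (PySem.Dict.ofList l).items = l := by
  have := PySem.Dict.items_foldl_insert_fresh l Prod.fst Prod.snd PySem.Dict.empty
    (fun a _ => PySem.Dict.contains_empty a.1) h
  have e : (PySem.Dict.ofList l).items
      = (List.foldl (fun d (a : String × Int) => d.insert a.1 a.2) PySem.Dict.empty l).items := rfl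
  rw [e, this]
  simp [show (PySem.Dict.empty : PySem.Dict String Int).items = [] from rfl]

theorem go_eq (idx : Int) (rows : List (List String)) :
    find_header_go idx rows = find_header_alt_go idx rows := by
  induction rows generalizing idx with
  | nil => rfl
  | cons row rest ih =>
    have hfound : alt_scan pvKeywords [] 0 row = (find_header_row row 0 PySem.Dict.empty).items :=
      row_eq row 0 PySem.Dict.empty pvKeywords [] rfl (by simp [PySem.Dict.contains_empty])
    have hnodup : ((find_header_row row 0 PySem.Dict.empty).items.map Prod.fst).Nodup :=
      row_nodup row 0 PySem.Dict.empty List.nodup_nil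
    have hcontains : (find_header_row row 0 PySem.Dict.empty).contains "item"
        = (find_header_row row 0 PySem.Dict.empty).items.any (fun p => p.1 == "item") := rfl
    have hsize : PySem.Dict.size (find_header_row row 0 PySem.Dict.empty)
        = (find_header_row row 0 PySem.Dict.empty).items.length := rfl
    simp only [find_header_go, find_header_alt_go, hfound, hcontains, hsize,
      items_ofList_of_nodup _ hnodup]
    rw [Bool.and_comm]
    split
    · rfl
    · exact ih (idx + 1)

-- ===== VERDICT (by name: the statement is the Claim_ definition above) =====
theorem find_header_py_spec : Claim_equal_find_header_py := by
  intro tr _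
  unfold Spec_find_header_py find_header_py find_header_py_alt
  exact go_eq 0 tr
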